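-- pv_equiv track=rewrite | github.com/pranavthaivalappil/ai-prep-mentor | prepinsta50/recursion/01_power_calculation.py | find_power_of_base
-- ===== SOURCE A (Python) =====
-- def find_power_of_base(number, base):
--     """
--     Find what power of base equals the number
--
--     Args:
--         number (int): Target number
--         base (int): Base
--
--     Returns:
--         int or None: Power if found, None otherwise
--     """
--     if number == 1:
--         return 0
--     if number < base:
--         return None
--     if number % base != 0:
--         return None
--
--     sub_power = find_power_of_base(number // base, base)
--     return sub_power + 1 if sub_power is not None else None
-- ===== SOURCE B (Python) =====
-- def find_power_of_base(number, base):
--     """Search upward: grow power = base**k by repeated multiplication until its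
--     magnitude reaches |number|, then compare, instead of recursively dividing."""
--     if number == 1:
--         return 0
--     if abs(base) <= 1:
--         return 1 if number == base else None
--     power, k = base, 1
--     while abs(power) < abs(number):
--         power *= base
--         k += 1
--     return k if power == number else None
-- ===== Notes on version B (the rewrite author's own statement) =====
-- stated objective: alternative
-- what changed: Instead of recursively dividing number down by base, B searches upward: it multiplies power = base**k until |power| reaches |number| and returns k on exact match.
-- intended difference: For base <= -2 and number = base**k with k >= 3, A returns None (its 'number < base' guard aborts the division chain at negative intermediate powers) while B returns k, the intended exponent since base**k equals number. — e.g. on find_power_of_base(-8, -2): A returns none, B returns some 3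
import Mathlib
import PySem

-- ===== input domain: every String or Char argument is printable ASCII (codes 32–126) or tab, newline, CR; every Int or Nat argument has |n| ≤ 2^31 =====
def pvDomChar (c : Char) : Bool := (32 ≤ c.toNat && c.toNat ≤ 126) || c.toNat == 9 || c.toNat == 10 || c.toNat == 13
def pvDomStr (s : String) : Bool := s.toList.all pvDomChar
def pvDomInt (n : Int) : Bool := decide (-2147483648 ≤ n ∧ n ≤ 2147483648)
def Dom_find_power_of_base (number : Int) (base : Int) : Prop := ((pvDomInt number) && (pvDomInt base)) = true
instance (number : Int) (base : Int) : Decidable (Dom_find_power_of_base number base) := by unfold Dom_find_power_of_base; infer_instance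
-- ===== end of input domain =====

-- B searches upward by multiplication (power = base^k grown until |power| ≥ |number|) instead of A's recursive division; for base ≤ -2 and number = base^k, k ≥ 3, B returns the intended k where A returns none (stated as D_).


-- ===== PORT A =====
-- Fuel makes the Python recursion total in Lean; on every input admitted by Pre_ the
-- recursion depth is at most number.natAbs + 1, so the fuel is never exhausted there.
def findPowAux (fuel : Nat) (number : Int) (base : Int) : Option Int :=
  match fuel with
  | 0 => none
  | fuel + 1 =>
    if number = 1 then some 0
    else if number < base then none
    else if PySem.Int.mod number base ≠ 0 then none
    else
      match findPowAux fuel (PySem.Int.floordiv number base) base with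
      | some sub_power => some (sub_power + 1)
      | none => none

def find_power_of_base (number : Int) (base : Int) : Option Int :=
  findPowAux (number.natAbs + 1) number base

-- ===== PORT B =====
-- the while loop of Source B: grow power = base^k by multiplication; same totality fuel
-- (for |base| ≥ 2 the loop ends after at most log₂|number| steps, so the fuel never runs out)
def powLoop (fuel : Nat) (power : Int) (k : Int) (number : Int) (base : Int) : Option Int :=
  match fuel with
  | 0 => none
  | fuel + 1 =>
    if |power| < |number| then powLoop fuel (power * base) (k + 1) number base
    else if power = number then some k else none

def find_power_of_base_alt (number : Int) (base : Int) : Option Int :=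
  if number = 1 then some 0
  else if |base| ≤ 1 then (if number = base then some 1 else none)
  else powLoop (number.natAbs + 1) base 1 number base

-- ===== PRECONDITION & SPEC =====
-- Pre_ excludes exactly the inputs where Python A raises: base = 0 with number ≥ 0, number ≠ 1
-- (ZeroDivisionError); base = 1 with number > 1 and number = 0 with base < 0 (RecursionError).
def Pre_find_power_of_base (number : Int) (base : Int) : Prop :=
  ¬(base = 0 ∧ 0 ≤ number ∧ number ≠ 1) ∧ ¬(base = 1 ∧ 1 < number) ∧ ¬(number = 0 ∧ base < 0)
instance (number : Int) (base : Int) : Decidable (Pre_find_power_of_base number base) := by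
  unfold Pre_find_power_of_base; infer_instance

def pvWitness_find_power_of_base : Int × Int := (8, 2)

-- For base ≤ -2 and number = base^k with k ≥ 3, A returns none (its `number < base` guard
-- aborts the division chain at negative intermediate powers) while B returns k, the intended
-- exponent since base^k equals number.  (Under Dom, |number| ≤ 2^31 forces k ≤ 31.)
def D_find_power_of_base (number : Int) (base : Int) : Prop :=
  base ≤ -2 ∧ ∃ k ∈ Finset.Icc 3 31, number = base ^ k
instance (number : Int) (base : Int) : Decidable (D_find_power_of_base number base) := by
  unfold D_find_power_of_base; infer_instance

def Spec_find_power_of_base (number : Int) (base : Int) (out : Option Int) : Prop :=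
  ¬ D_find_power_of_base number base → out = find_power_of_base_alt number base
instance (number : Int) (base : Int) (out : Option Int) : Decidable (Spec_find_power_of_base number base out) := by
  unfold Spec_find_power_of_base; infer_instance

def pvDiffWitness_find_power_of_base : Int × Int := (-8, -2)
def pvDiffWitnessOut_find_power_of_base : (Option Int) × (Option Int) := (none, some 3)

-- ===== CLAIM =====
def Claim_unchanged_find_power_of_base : Prop := ∀ (number : Int) (base : Int), Dom_find_power_of_base number base → Pre_find_power_of_base number base → Spec_find_power_of_base number base (find_power_of_base number base)
def Claim_changed_find_power_of_base : Prop := Dom_find_power_of_base (pvDiffWitness_find_power_of_base.1) (pvDiffWitness_find_power_of_base.2) ∧ Pre_find_power_of_base (pvDiffWitness_find_power_of_base.1) (pvDiffWitness_find_power_of_base.2) ∧ D_find_power_of_base (pvDiffWitness_find_power_of_base.1) (pvDiffWitness_find_power_of_base.2) ∧ find_power_of_base (pvDiffWitness_find_power_of_base.1) (pvDiffWitness_find_power_of_base.2) = pvDiffWitnessOut_find_power_of_base.1 ∧ find_power_of_base_alt (pvDiffWitness_find_power_of_base.1) (pvDiffWitness_find_power_of_base.2) = pvDiffWitnessOut_find_power_of_base.2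 ∧ pvDiffWitnessOut_find_power_of_base.1 ≠ pvDiffWitnessOut_find_power_of_base.2
def Claim_exact_find_power_of_base : Prop := ∀ (number : Int) (base : Int), Dom_find_power_of_base number base → Pre_find_power_of_base number base → D_find_power_of_base number base → find_power_of_base number base ≠ find_power_of_base_alt number base

-- ===== LEMMAS AND PROOFS =====

theorem fp_mod_zero (n b q : Int) (h : n = q * b) : PySem.Int.mod n b = 0 :=
  (PySem.Int.mod_eq_zero_iff_dvd n b).mpr ⟨q, by rw [h]; ring⟩

theorem fp_floordiv_eq (n b q : Int) (hb : b ≠ 0) (h : n = q * b) : PySem.Int.floordiv n b = q := by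
  have h2 := PySem.Int.floordiv_mul_add_mod n b
  rw [fp_mod_zero n b q h, add_zero] at h2
  exact mul_right_cancel₀ hb (by rw [h2, h])

theorem findPowAux_sound (b : Int) :
    ∀ (fuel : Nat) (n r : Int), findPowAux fuel n b = some r → ∃ m : Nat, r = (m : Int) ∧ n = b ^ m := by
  intro fuel
  induction fuel with
  | zero => intro n r h; simp [findPowAux] at h
  | succ f ih =>
    intro n r h
    simp only [findPowAux] at h
    split_ifs at h with h1 h2 h3
    · exact ⟨0, by simpa using h.symm, by simpa using h1⟩
    · cases hsub : findPowAux f (PySem.Int.floordiv n b) b with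
      | none => rw [hsub] at h; simp at h
      | some s =>
        rw [hsub] at h
        obtain ⟨m, rfl, hn⟩ := ih _ _ hsub
        have hdiv : n = PySem.Int.floordiv n b * b := by
          have h2 := PySem.Int.floordiv_mul_add_mod n b
          rw [not_ne_iff] at h3
          omega
        refine ⟨m + 1, ?_, ?_⟩
        · simp only [Option.some.injEq] at h; push_cast; omega
        · rw [hdiv, hn]; ring

theorem findPowAux_complete_pos (b : Int) (hb : 2 ≤ b) :
    ∀ (k fuel : Nat), k < fuel → findPowAux fuel ((b : Int) ^ k) b = some (k : Int) := by
  intro k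
  induction k with
  | zero =>
    intro fuel hf
    obtain ⟨f, rfl⟩ : ∃ f, fuel = f + 1 := ⟨fuel - 1, by omega⟩
    simp [findPowAux]
  | succ m ih =>
    intro fuel hf
    obtain ⟨f, rfl⟩ : ∃ f, fuel = f + 1 := ⟨fuel - 1, by omega⟩
    have hpow : (1 : Int) ≤ b ^ m := one_le_pow₀ (by omega)
    have hge : b ≤ b ^ (m + 1) := by
      calc b = b * 1 := by ring
      _ ≤ b * b ^ m := by nlinarith
      _ = b ^ (m + 1) := by ring
    have hmod := fp_mod_zero (b ^ (m + 1)) b (b ^ m) (by ring)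
    have hdiv := fp_floordiv_eq (b ^ (m + 1)) b (b ^ m) (by omega) (by ring)
    simp only [findPowAux, if_neg (by nlinarith : ¬ b ^ (m+1) = 1),
      if_neg (not_lt.mpr hge), hmod, hdiv, ih f (by omega)]
    norm_num

theorem findPowAux_one (b : Int) (hb : b ≤ -2) :
    ∀ fuel, 2 ≤ fuel → findPowAux fuel b b = some 1 := by
  intro fuel hf
  obtain ⟨f, rfl⟩ : ∃ f, fuel = f + 1 := ⟨fuel - 1, by omega⟩
  obtain ⟨g, rfl⟩ : ∃ g, f = g + 1 := ⟨f - 1, by omega⟩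
  have hmod := fp_mod_zero b b 1 (by ring)
  have hdiv := fp_floordiv_eq b b 1 (by omega) (by ring)
  simp [findPowAux, hmod, hdiv, show ¬ b = 1 by omega]

theorem findPowAux_two (b : Int) (hb : b ≤ -2) :
    ∀ fuel, 3 ≤ fuel → findPowAux fuel (b ^ 2) b = some 2 := by
  intro fuel hf
  obtain ⟨f, rfl⟩ : ∃ f, fuel = f + 1 := ⟨fuel - 1, by omega⟩
  have hmod := fp_mod_zero (b ^ 2) b b (by ring)
  have hdiv := fp_floordiv_eq (b ^ 2) b b (by omega) (by ring)
  simp only [findPowAux, if_neg (by nlinarith : ¬ b ^ 2 = 1),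
    if_neg (by nlinarith : ¬ b ^ 2 < b), hmod, hdiv,
    findPowAux_one b hb f (by omega)]
  norm_num

-- odd k ≥ 3, b ≤ -2 : b^k < b
theorem fp_odd_pow_lt (b : Int) (hb : b ≤ -2) (k : Nat) (hk : 3 ≤ k) (ho : Odd k) :
    b ^ k < b := by
  have he : Even (k - 1) := by rcases ho with ⟨m, rfl⟩; exact ⟨m, by omega⟩
  have habs : (2 : Int) ≤ |b| := by rw [abs_of_nonpos (by omega)]; omega
  have h1 : (2 : Int) ^ (k - 1) ≤ |b| ^ (k - 1) := pow_le_pow_left₀ (by norm_num) habs _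
  have h2 : (2 : Int) ≤ 2 ^ (k - 1) := by
    calc (2:Int) = 2 ^ 1 := by norm_num
    _ ≤ 2 ^ (k - 1) := pow_le_pow_right₀ (by norm_num) (by omega)
  have h3 : (2 : Int) ≤ b ^ (k - 1) := by
    have h4 : |b| ^ (k - 1) = b ^ (k - 1) := he.pow_abs b
    omega
  have hsplit : b ^ k = b * b ^ (k - 1) := by
    rw [← pow_succ']; congr 1; omega
  nlinarith

theorem findPowAux_neg_none (b : Int) (hb : b ≤ -2) (k : Nat) (hk : 3 ≤ k) :
    ∀ fuel, findPowAux fuel (b ^ k) b = none := by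
  intro fuel
  rcases Nat.even_or_odd k with he | ho
  · -- even k ≥ 4 : guards pass, recurse on b^(k-1) which is odd ≥ 3
    rcases fuel with _ | f
    · rfl
    have hk4 : 4 ≤ k := by rcases he with ⟨m, rfl⟩; omega
    have habs : (2 : Int) ≤ |b| := by rw [abs_of_nonpos (by omega)]; omega
    have h1 : (2 : Int) ^ k ≤ |b| ^ k := pow_le_pow_left₀ (by norm_num) habs _
    have h2 : (2 : Int) ≤ 2 ^ k := by
      calc (2:Int) = 2 ^ 1 := by norm_num
      _ ≤ 2 ^ k := pow_le_pow_right₀ (by norm_num) (by omega)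
    have hpos : (2 : Int) ≤ b ^ k := by
      have := (he.pow_abs b).symm
      omega
    have hmod := fp_mod_zero (b ^ k) b (b ^ (k - 1)) (by rw [← pow_succ]; congr 1; omega)
    have hdiv := fp_floordiv_eq (b ^ k) b (b ^ (k - 1)) (by omega) (by rw [← pow_succ]; congr 1; omega)
    have hodd : Odd (k - 1) := by rcases he with ⟨m, rfl⟩; exact ⟨m - 1, by omega⟩
    have hsub : ∀ g, findPowAux g (b ^ (k - 1)) b = none := by
      intro g
      rcases g with _ | g
      · rfl
      · have hlt := fp_odd_pow_lt b hb (k - 1) (by omega) hodd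
        simp [findPowAux, show ¬ (b ^ (k-1) = 1) by omega, show b ^ (k-1) < b from hlt]
    simp only [findPowAux, if_neg (by omega : ¬ b ^ k = 1),
      if_neg (by omega : ¬ b ^ k < b), hmod, hdiv, hsub f]
    norm_num
  · rcases fuel with _ | f
    · rfl
    · have hlt := fp_odd_pow_lt b hb k hk ho
      simp [findPowAux, show ¬ (b ^ k = 1) by omega, show b ^ k < b from hlt]

theorem powLoop_sound (n b : Int) :
    ∀ (fuel : Nat) (p c r : Int), powLoop fuel p c n b = some r → ∃ j : Nat, n = p * b ^ j ∧ r = c + j := by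
  intro fuel
  induction fuel with
  | zero => intro p c r h; simp [powLoop] at h
  | succ f ih =>
    intro p c r h
    simp only [powLoop] at h
    split_ifs at h with h1 h2
    · obtain ⟨j, hn, hr⟩ := ih _ _ _ h
      exact ⟨j + 1, by rw [hn]; ring, by rw [hr]; push_cast; ring⟩
    · simp only [Option.some.injEq] at h
      exact ⟨0, by simp [h2], by omega⟩

theorem powLoop_complete (b : Int) (hb : 2 ≤ |b|) :
    ∀ (j : Nat) (p c : Int), 1 ≤ |p| → ∀ fuel, j < fuel →
      powLoop fuel p c (p * b ^ j) b = some (c + j) := by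
  intro j
  induction j with
  | zero =>
    intro p c hp fuel hf
    obtain ⟨f, rfl⟩ : ∃ f, fuel = f + 1 := ⟨fuel - 1, by omega⟩
    simp [powLoop]
  | succ m ih =>
    intro p c hp fuel hf
    obtain ⟨f, rfl⟩ : ∃ f, fuel = f + 1 := ⟨fuel - 1, by omega⟩
    have h2m : (2:Int) ≤ 2 ^ (m+1) := by
      calc (2:Int) = 2 ^ 1 := by norm_num
      _ ≤ 2 ^ (m+1) := pow_le_pow_right₀ (by norm_num) (by omega)
    have hpow : (2 : Int) ≤ |b| ^ (m + 1) := le_trans h2m (pow_le_pow_left₀ (by norm_num) hb _)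
    have hcond : |p| < |p * b ^ (m + 1)| := by
      rw [abs_mul, abs_pow]; nlinarith
    have hih := ih (p * b) (c + 1) (by rw [abs_mul]; nlinarith) f (by omega)
    rw [powLoop, if_pos hcond,
      show p * b ^ (m + 1) = (p * b) * b ^ m from by ring, hih]
    congr 1; push_cast; ring

theorem fp_fuel (b : Int) (hb : 2 ≤ |b|) (k : Nat) : k < (b ^ k).natAbs + 1 := by
  have hna : 2 ≤ b.natAbs := by
    have := Int.abs_eq_natAbs b
    omega
  have h1 : k < 2 ^ k := Nat.lt_two_pow_self
  have h2 : 2 ^ k ≤ b.natAbs ^ k := Nat.pow_le_pow_left hna k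
  have h3 : (b ^ k).natAbs = b.natAbs ^ k := Int.natAbs_pow b k
  omega

theorem fp_main (n b : Int) (hdom : Dom_find_power_of_base n b)
    (hpre : Pre_find_power_of_base n b) (hD : ¬ D_find_power_of_base n b) :
    find_power_of_base n b = find_power_of_base_alt n b := by
  obtain ⟨hp1, hp2, hp3⟩ := hpre
  unfold find_power_of_base find_power_of_base_alt
  by_cases h1 : n = 1
  · subst h1; simp [findPowAux]
  rw [if_neg h1]
  by_cases hb1 : |b| ≤ 1
  · rw [if_pos hb1]
    have hb' : b = -1 ∨ b = 0 ∨ b = 1 := by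
      rcases abs_le.mp hb1 with ⟨hl, hr⟩; omega
    rcases hb' with rfl | rfl | rfl
    · by_cases hn : n = -1
      · subst hn; decide
      · rw [if_neg hn]
        rcases lt_trichotomy n (-1) with hlt | heq | hgt
        · rcases Nat.exists_eq_add_of_lt (Nat.zero_lt_succ n.natAbs) with _
          simp [findPowAux, h1, hlt]
        · exact absurd heq hn
        · have hn0 : n ≠ 0 := fun h => hp3 ⟨h, by norm_num⟩
          have hn2 : 2 ≤ n := by omega
          have hmod := fp_mod_zero n (-1) (-n) (by ring)
          have hdiv := fp_floordiv_eq n (-1) (-n) (by norm_num) (by ring)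
          have hfuel : n.natAbs + 1 = (n.natAbs - 1) + 1 + 1 := by omega
          rw [hfuel]
          simp [findPowAux, hmod, hdiv, h1, show ¬ n < -1 by omega,
            show ¬ (-n) = 1 by omega, show -n < -1 by omega]
    · have hn : n < 0 := by
        by_contra h
        exact hp1 ⟨rfl, by omega, h1⟩
      simp [findPowAux, h1, show n < 0 from hn, show ¬ n = 0 by omega]
    · have hn : n < 1 := by
        by_contra h
        exact hp2 ⟨rfl, by omega⟩
      simp [findPowAux, h1, hn]
  · rw [if_neg hb1]
    have habs : 2 ≤ |b| := by
      have h0 : 0 ≤ |b| := abs_nonneg b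
      omega
    have hbne : b ≠ 0 := by
      intro h
      rw [h] at hb1
      simp at hb1
    by_cases hex : ∃ k : Nat, n = b ^ k
    · obtain ⟨k, rfl⟩ := hex
      have hk0 : k ≠ 0 := by rintro rfl; simp at h1
      have hfuelk := fp_fuel b habs k
      have hloop := powLoop_complete b habs (k - 1) b 1 (by omega) ((b ^ k).natAbs + 1) (by omega)
      rw [show b * b ^ (k - 1) = b ^ k from by rw [← pow_succ']; congr 1; omega] at hloop
      rcases le_or_gt 2 b with hbpos | hbneg
      · rw [findPowAux_complete_pos b hbpos k _ hfuelk, hloop]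
        congr 1
        omega
      · have hbneg2 : b ≤ -2 := by
          rcases abs_cases b with ⟨h, _⟩ | ⟨h, _⟩ <;> omega
        rcases le_or_gt k 2 with hk2 | hk3
        · have hk12 : k = 1 ∨ k = 2 := by omega
          rcases hk12 with rfl | rfl
          · rw [hloop]
            rw [show ((b ^ 1).natAbs + 1) = b.natAbs + 1 from by rw [pow_one],
              show (b : Int) ^ 1 = b from pow_one b]
            rw [findPowAux_one b hbneg2 _ (by omega : 2 ≤ b.natAbs + 1)]
            norm_num
          · have hna : 2 ≤ b.natAbs := by
              have := Int.abs_eq_natAbs b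
              omega
            have h3 : (b ^ 2).natAbs = b.natAbs ^ 2 := Int.natAbs_pow b 2
            have h4 : 2 ^ 2 ≤ b.natAbs ^ 2 := Nat.pow_le_pow_left hna 2
            rw [hloop, findPowAux_two b hbneg2 _ (by omega)]
            norm_num
        · exfalso
          apply hD
          refine ⟨hbneg2, k, Finset.mem_Icc.mpr ⟨by omega, ?_⟩, rfl⟩
          have hbound : (b ^ k).natAbs ≤ 2 ^ 31 := by
            simp only [Dom_find_power_of_base, pvDomInt, Bool.and_eq_true, decide_eq_true_eq] at hdom
            omega
          have hna : 2 ≤ b.natAbs := by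
            have := Int.abs_eq_natAbs b
            omega
          by_contra hgt
          have h32 : 2 ^ 32 ≤ 2 ^ k := Nat.pow_le_pow_right (by norm_num) (by omega)
          have h2 : 2 ^ k ≤ b.natAbs ^ k := Nat.pow_le_pow_left hna k
          have h3 : (b ^ k).natAbs = b.natAbs ^ k := Int.natAbs_pow b k
          have : (2:Nat) ^ 32 ≤ 2 ^ 31 := by omega
          norm_num at this
    · push Not at hex
      cases hA : findPowAux (n.natAbs + 1) n b with
      | some r =>
        obtain ⟨m, _, hn⟩ := findPowAux_sound b _ _ _ hA
        exact absurd hn (hex m)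
      | none =>
        cases hB : powLoop (n.natAbs + 1) b 1 n b with
        | some r =>
          obtain ⟨j, hn, _⟩ := powLoop_sound n b _ _ _ _ hB
          refine absurd ?_ (hex (j + 1))
          rw [hn, ← pow_succ']
        | none => rfl

theorem fp_tight (n b : Int) (hdom : Dom_find_power_of_base n b)
    (hpre : Pre_find_power_of_base n b) (hd : D_find_power_of_base n b) :
    find_power_of_base n b ≠ find_power_of_base_alt n b := by
  obtain ⟨hbneg, k, hk, rfl⟩ := hd
  rw [Finset.mem_Icc] at hk
  have habs : 2 ≤ |b| := by rw [abs_of_nonpos (by omega)]; omega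
  unfold find_power_of_base find_power_of_base_alt
  rw [findPowAux_neg_none b hbneg k hk.1 _]
  have hna : 2 ≤ b.natAbs := by
    have := Int.abs_eq_natAbs b
    omega
  have hne1 : b ^ k ≠ 1 := by
    intro h
    have h3 : (b ^ k).natAbs = b.natAbs ^ k := Int.natAbs_pow b k
    have h2 : 2 ^ k ≤ b.natAbs ^ k := Nat.pow_le_pow_left hna k
    have h4 : 2 ≤ 2 ^ k := by
      calc (2:Nat) = 2 ^ 1 := by norm_num
      _ ≤ 2 ^ k := Nat.pow_le_pow_right (by norm_num) (by omega)
    rw [h] at h3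
    simp at h3
    omega
  rw [if_neg hne1, if_neg (by omega : ¬ |b| ≤ 1)]
  have hloop := powLoop_complete b habs (k - 1) b 1 (by omega) ((b ^ k).natAbs + 1)
    (by have := fp_fuel b habs k; omega)
  rw [show b * b ^ (k - 1) = b ^ k from by rw [← pow_succ']; congr 1; omega] at hloop
  rw [hloop]
  simp

-- ===== VERDICT =====
theorem find_power_of_base_spec : Claim_unchanged_find_power_of_base := by
  intro n b hdom hpre hD
  exact fp_main n b hdom hpre hD
theorem find_power_of_base_changed : Claim_changed_find_power_of_base := by
  unfold Claim_changed_find_power_of_base; decide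
theorem find_power_of_base_tight : Claim_exact_find_power_of_base := by
  intro n b hdom hpre hd
  exact fp_tight n b hdom hpre hd
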